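-- pv_equiv track=rewrite | github.com/S-Christensen/cartographersStudy | scoringCards.py | stonesideForest
-- ===== SOURCE A (Python) =====
-- def dfs(grid, row, col, visited, terrain_type):
--     stack = [(row, col)]
--     cluster = []
--
--     while stack:
--         r, c = stack.pop()
--         if (r, c) not in visited and grid[r][c] == terrain_type:
--             visited.add((r, c))
--             cluster.append((r, c))
--             for dr, dc in [(1, 0), (-1, 0), (0, 1), (0, -1)]:
--                 nr, nc = r + dr, c + dc
--                 if 0 <= nr < len(grid) and 0 <= nc < len(grid[0]):
--                     stack.append((nr, nc))
--     return cluster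
--
-- def stonesideForest(grid):
--     visited = set()
--     clusters = []
--
--     for r in range(len(grid)):
--         for c in range(len(grid[0])):
--             if (r, c) not in visited and grid[r][c] == "forest":
--                 cluster = dfs(grid, r, c, visited, "forest")
--                 clusters.append(cluster)
--
--     count = 0
--     for cluster in clusters:
--         mountains = set()
--         for r, c in cluster:
--             for dr, dc in [(1,0), (-1,0), (0,1), (0,-1)]:
--                 nr, nc = r + dr, c + dc
--                 if 0 <= nr < len(grid) and 0 <= nc < len(grid[0]) and grid[nr][nc] == "mountain":
--                     mountains.add((nr, nc))
--         if len(mountains) >= 2: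
--             count += len(mountains)
--
--     return count * 3
-- ===== SOURCE B (Python) =====
-- def stonesideForest(grid):
--     if not grid:
--         return 0
--     H, W = len(grid), len(grid[0])
--
--     def fneighbors(cells, terrain):
--         return {(nr, nc)
--                 for (r, c) in cells
--                 for (nr, nc) in ((r + 1, c), (r - 1, c), (r, c + 1), (r, c - 1))
--                 if 0 <= nr < H and 0 <= nc < W and grid[nr][nc] == terrain}
--
--     visited = set()
--     total = 0
--     for r in range(H):
--         for c in range(W):
--             if (r, c) in visited or grid[r][c] != "forest":
--                 continue
--             # grow the component by iterated neighbourhood expansion to a fixpoint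
--             comp = {(r, c)}
--             for _ in range(H * W):
--                 nxt = comp | fneighbors(comp, "forest")
--                 if nxt == comp:
--                     break
--                 comp = nxt
--             visited |= comp
--             mountains = fneighbors(comp, "mountain")
--             if len(mountains) >= 2:
--                 total += len(mountains)
--     return total * 3
-- ===== Notes on version B (the rewrite author's own statement) =====
-- stated objective: alternative
-- what changed: Replaces the explicit DFS stack and the two-phase cluster list with a fixpoint computation: each forest component is grown by iterated neighbourhood expansion until stable, and scoring is fused into the same single scan instead of a separate pass over a clusters list.
import Mathlib
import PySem

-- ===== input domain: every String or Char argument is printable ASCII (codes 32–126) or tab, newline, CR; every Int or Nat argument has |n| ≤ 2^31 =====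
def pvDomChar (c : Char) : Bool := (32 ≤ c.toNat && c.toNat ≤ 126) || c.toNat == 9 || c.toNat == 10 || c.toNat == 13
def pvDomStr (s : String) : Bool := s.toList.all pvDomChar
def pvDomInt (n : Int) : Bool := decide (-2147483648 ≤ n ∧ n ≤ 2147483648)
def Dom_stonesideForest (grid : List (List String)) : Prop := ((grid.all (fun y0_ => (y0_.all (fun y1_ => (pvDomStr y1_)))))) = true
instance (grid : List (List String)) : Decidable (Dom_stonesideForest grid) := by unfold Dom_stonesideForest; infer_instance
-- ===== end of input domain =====

-- B replaces A's explicit DFS stack and two-phase cluster list by a per-component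
-- fixpoint (iterated neighbourhood expansion) with scoring fused into the single scan;
-- objective: alternative (not faster).

-- ===== PORT A =====
-- Shared cell helpers: grid[r][c] is only ever read by either program behind its own
-- '0 <= . < len' bounds checks, so the guarded access pvCell (none = out of bounds) is
-- exact for every access the Python performs (under Pre_ each in-bounds access succeeds).
def pvNbrs (p : Int × Int) : List (Int × Int) :=
  [(p.1 + 1, p.2), (p.1 - 1, p.2), (p.1, p.2 + 1), (p.1, p.2 - 1)]

def pvCell (grid : List (List String)) (p : Int × Int) : Option String :=
  if 0 ≤ p.1 ∧ p.1 < (grid.length : Int) ∧ 0 ≤ p.2 ∧ p.2 < ((grid.headD []).length : Int)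
  then some ((grid.getD p.1.toNat []).getD p.2.toNat "") else none

-- Termination measure for A's while-stack loop (cells not yet visited, weighted, plus stack size).
def pvAllCells (grid : List (List String)) : Finset (Int × Int) :=
  (Finset.range grid.length ×ˢ Finset.range (grid.headD []).length).image
    (fun rc => ((rc.1 : Int), (rc.2 : Int)))

lemma mem_pvAllCells (grid : List (List String)) (p : Int × Int) :
    p ∈ pvAllCells grid ↔
      0 ≤ p.1 ∧ p.1 < (grid.length : Int) ∧ 0 ≤ p.2 ∧ p.2 < ((grid.headD []).length : Int) := by
  rcases p with ⟨a, b⟩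
  simp only [pvAllCells, Finset.mem_image, Finset.mem_product, Finset.mem_range, Prod.exists,
    Prod.mk.injEq]
  constructor
  · rintro ⟨x, y, ⟨hx, hy⟩, rfl, rfl⟩
    refine ⟨by positivity, by exact_mod_cast hx, by positivity, by exact_mod_cast hy⟩
  · rintro ⟨h1, h2, h3, h4⟩
    exact ⟨a.toNat, b.toNat, ⟨by omega, by omega⟩, by omega, by omega⟩

def pvMeasure (grid : List (List String)) (stack : List (Int × Int))
    (visited : PySem.Set (Int × Int)) : Nat :=
  5 * ((pvAllCells grid).filter (fun q => q ∉ visited)).card + stack.length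

lemma pvCell_mem_allCells {grid : List (List String)} {p : Int × Int} {t : String}
    (h : pvCell grid p = some t) : p ∈ pvAllCells grid := by
  unfold pvCell at h
  split at h
  · rename_i hb
    rw [mem_pvAllCells]
    omega
  · exact absurd h (by simp)

lemma pvMeasure_push {grid : List (List String)} {p : Int × Int}
    {visited : PySem.Set (Int × Int)} (rest more : List (Int × Int))
    (hlen : more.length ≤ 4)
    (h1 : p ∉ visited) (h2 : pvCell grid p = some "forest") :
    pvMeasure grid (more ++ rest) (PySem.Set.add visited p) < pvMeasure grid (p :: rest) visited := by
  have hadd : ∀ q : Int × Int, q ∈ PySem.Set.add visited p ↔ q ∈ visited ∨ q = p :=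
    fun q => PySem.Set.mem_add visited p q
  have hsub : (pvAllCells grid).filter (fun q => q ∉ PySem.Set.add visited p) ⊂
      (pvAllCells grid).filter (fun q => q ∉ visited) := by
    constructor
    · intro q hq
      simp only [Finset.mem_filter] at hq ⊢
      exact ⟨hq.1, fun hv => hq.2 ((hadd q).2 (Or.inl hv))⟩
    · intro hback
      have hp1 : p ∈ (pvAllCells grid).filter (fun q => q ∉ visited) := by
        simp only [Finset.mem_filter]
        exact ⟨pvCell_mem_allCells h2, h1⟩
      have hp2 := hback hp1
      simp only [Finset.mem_filter] at hp2
      exact hp2.2 ((hadd p).2 (Or.inr rfl))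
  have hcard := Finset.card_lt_card hsub
  simp only [pvMeasure, List.length_append, List.length_cons]
  omega

def pvDfsLoop (grid : List (List String)) :
    List (Int × Int) → PySem.Set (Int × Int) → List (Int × Int) →
      PySem.Set (Int × Int) × List (Int × Int)
  | [], visited, cluster => (visited, cluster)
  | p :: rest, visited, cluster =>
    if h : p ∉ visited ∧ pvCell grid p = some "forest" then
      pvDfsLoop grid (((pvNbrs p).filter (fun n => (pvCell grid n).isSome)).reverse ++ rest)
        (PySem.Set.add visited p) (cluster ++ [p])
    else
      pvDfsLoop grid rest visited cluster
termination_by stack visited _ => pvMeasure grid stack visited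
decreasing_by
  · exact pvMeasure_push rest _ (by simpa using List.length_filter_le _ (pvNbrs p)) h.1 h.2
  · simp [pvMeasure]

def pvMountainsA (grid : List (List String)) (cluster : List (Int × Int)) :
    PySem.Set (Int × Int) :=
  cluster.foldl
    (fun m q => ((pvNbrs q).filter (fun n => pvCell grid n = some "mountain")).foldl
      PySem.Set.add m)
    PySem.Set.empty

def pvScoreStep (grid : List (List String)) (acc : Int) (cl : List (Int × Int)) : Int :=
  let mountains := pvMountainsA grid cl
  if 2 ≤ PySem.Set.len mountains then acc + PySem.Set.len mountains else acc

def pvInnerA (grid : List (List String)) (r : Int)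
    (s : PySem.Set (Int × Int) × List (List (Int × Int))) (c : Int) :
    PySem.Set (Int × Int) × List (List (Int × Int)) :=
  if (r, c) ∉ s.1 ∧ pvCell grid (r, c) = some "forest" then
    let res := pvDfsLoop grid [(r, c)] s.1 []
    (res.1, s.2 ++ [res.2])
  else s

def stonesideForest (grid : List (List String)) : Int :=
  let scan := (PySem.List.pyRange 0 (grid.length : Int) 1).foldl
    (fun s r => (PySem.List.pyRange 0 ((grid.headD []).length : Int) 1).foldl (pvInnerA grid r) s)
    (PySem.Set.empty, [])
  (scan.2.foldl (pvScoreStep grid) 0) * 3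

-- ===== PORT B =====
def pvFNbrs (grid : List (List String)) (cells : List (Int × Int)) (terrain : String) :
    PySem.Set (Int × Int) :=
  cells.foldl
    (fun s q => PySem.Set.update s ((pvNbrs q).filter (fun n => pvCell grid n = some terrain)))
    PySem.Set.empty

def pvExpand (grid : List (List String)) (comp : PySem.Set (Int × Int)) :
    PySem.Set (Int × Int) :=
  PySem.Set.union comp (pvFNbrs grid comp "forest")

def pvGrow (grid : List (List String)) : Nat → PySem.Set (Int × Int) → PySem.Set (Int × Int)
  | 0, comp => comp
  | fuel + 1, comp =>
    let nxt := pvExpand grid comp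
    if PySem.Set.equal nxt comp then comp else pvGrow grid fuel nxt

def pvInnerB (grid : List (List String)) (r : Int)
    (s : PySem.Set (Int × Int) × Int) (c : Int) : PySem.Set (Int × Int) × Int :=
  if (r, c) ∈ s.1 ∨ ¬ pvCell grid (r, c) = some "forest" then s
  else
    let comp := pvGrow grid (grid.length * (grid.headD []).length)
      (PySem.Set.add PySem.Set.empty (r, c))
    let mountains := pvFNbrs grid comp "mountain"
    (PySem.Set.union s.1 comp,
     if 2 ≤ PySem.Set.len mountains then s.2 + PySem.Set.len mountains else s.2)

def stonesideForest_alt (grid : List (List String)) : Int :=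
  if grid = [] then 0
  else
    ((PySem.List.pyRange 0 (grid.length : Int) 1).foldl
      (fun s r => (PySem.List.pyRange 0 ((grid.headD []).length : Int) 1).foldl (pvInnerB grid r) s)
      (PySem.Set.empty, 0)).2 * 3

-- ===== PRECONDITION & SPEC =====
-- Pre_ excludes exactly the ragged grids on which A raises IndexError: a row shorter than
-- row 0 is indexed at a column < len(grid[0]).  (B raises there too.)
def Pre_stonesideForest (grid : List (List String)) : Prop :=
  ∀ row ∈ grid, (grid.headD []).length ≤ row.length
instance (grid : List (List String)) : Decidable (Pre_stonesideForest grid) := by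
  unfold Pre_stonesideForest; infer_instance

def pvWitness_stonesideForest : List (List String) :=
  [["forest", "mountain"], ["mountain", "empty"]]

def Spec_stonesideForest (grid : List (List String)) (out : Int) : Prop := out = stonesideForest_alt grid
instance (grid : List (List String)) (out : Int) : Decidable (Spec_stonesideForest grid out) := by unfold Spec_stonesideForest; infer_instance

-- ===== CLAIM (what is proved, stated in full; the proofs are below) =====
def Claim_equal_stonesideForest : Prop := ∀ (grid : List (List String)), Dom_stonesideForest grid → Pre_stonesideForest grid → Spec_stonesideForest grid (stonesideForest grid)

-- ===== LEMMAS AND PROOFS =====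

-- Reachability through forest cells avoiding a blocked set V.
def pvStep (grid : List (List String)) (V : List (Int × Int)) (p q : Int × Int) : Prop :=
  q ∈ pvNbrs p ∧ pvCell grid q = some "forest" ∧ q ∉ V

def pvReach (grid : List (List String)) (V : List (Int × Int)) (s p : Int × Int) : Prop :=
  Relation.ReflTransGen (pvStep grid V) s p

def pvRch (grid : List (List String)) (V : List (Int × Int)) (S : List (Int × Int))
    (p : Int × Int) : Prop :=
  ∃ s ∈ S, pvCell grid s = some "forest" ∧ s ∉ V ∧ pvReach grid V s p

def pvClosed (grid : List (List String)) (V : List (Int × Int)) : Prop :=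
  ∀ v ∈ V, ∀ n ∈ pvNbrs v, pvCell grid n = some "forest" → n ∈ V

lemma pvNbrs_symm {p q : Int × Int} (h : q ∈ pvNbrs p) : p ∈ pvNbrs q := by
  rcases p with ⟨a, b⟩; rcases q with ⟨c, d⟩
  simp [pvNbrs, Prod.ext_iff] at h ⊢
  omega

lemma pvNbrs_ne {p q : Int × Int} (h : q ∈ pvNbrs p) : q ≠ p := by
  rcases p with ⟨a, b⟩; rcases q with ⟨c, d⟩
  simp [pvNbrs, Prod.ext_iff] at h ⊢
  omega

lemma pvReach_mono {grid : List (List String)} {V V' : List (Int × Int)}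
    (hVV : ∀ q, q ∈ V → q ∈ V') {s p : Int × Int}
    (h : pvReach grid V' s p) : pvReach grid V s p :=
  Relation.ReflTransGen.mono (fun a b hab => ⟨hab.1, hab.2.1, fun hm => hab.2.2 (hVV _ hm)⟩) h

-- Erase lemma: removing a freshly-visited x from circulation.
lemma pvReach_erase {grid : List (List String)} {V V' : List (Int × Int)} {x : Int × Int}
    (hV' : ∀ q, q ∈ V' ↔ q ∈ V ∨ q = x) {s p : Int × Int}
    (h : pvReach grid V s p) :
    pvReach grid V' s p ∨
      (∃ n ∈ pvNbrs x, pvCell grid n = some "forest" ∧ n ∉ V' ∧ pvReach grid V' n p) ∨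
      p = x := by
  induction h with
  | refl => exact Or.inl .refl
  | @tail b q hsb hstep ih =>
    rcases hstep with ⟨hn, hFq, hqV⟩
    have hnotV' : q ≠ x → q ∉ V' := fun hqx hm => by
      rcases (hV' q).1 hm with hh | hh
      · exact hqV hh
      · exact hqx hh
    rcases ih with hr | ⟨n, hn', hFn, hnV', hr⟩ | rfl
    · by_cases hpx : q = x
      · exact Or.inr (Or.inr hpx)
      · exact Or.inl (hr.tail ⟨hn, hFq, hnotV' hpx⟩)
    · by_cases hpx : q = x
      · exact Or.inr (Or.inr hpx)
      · exact Or.inr (Or.inl ⟨n, hn', hFn, hnV', hr.tail ⟨hn, hFq, hnotV' hpx⟩⟩)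
    · exact Or.inr (Or.inl ⟨q, hn, hFq, hnotV' (pvNbrs_ne hn), .refl⟩)

-- Popping a fresh forest cell x.
lemma pvRch_cons_forest {grid : List (List String)} {V V' : List (Int × Int)} {x : Int × Int}
    (hV' : ∀ q, q ∈ V' ↔ q ∈ V ∨ q = x)
    (hF : pvCell grid x = some "forest") (hxV : x ∉ V) (rest : List (Int × Int)) (p : Int × Int) :
    pvRch grid V (x :: rest) p ↔
      (p = x ∨ pvRch grid V' (((pvNbrs x).filter (fun n => (pvCell grid n).isSome)).reverse ++ rest) p) := by
  have hmemN : ∀ q : Int × Int,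
      q ∈ ((pvNbrs x).filter (fun n => (pvCell grid n).isSome)).reverse ++ rest ↔
        (q ∈ pvNbrs x ∧ (pvCell grid q).isSome) ∨ q ∈ rest := by
    intro q
    simp only [List.mem_append, List.mem_reverse, List.mem_filter]
  have hVsub : ∀ q : Int × Int, q ∈ V → q ∈ V' := fun q hq => (hV' q).2 (Or.inl hq)
  have hout : ∀ q : Int × Int, q ∉ V → q ≠ x → q ∉ V' := fun q h1 h2 hm => by
    rcases (hV' q).1 hm with hh | hh
    · exact h1 hh
    · exact h2 hh
  constructor
  · rintro ⟨s, hs, hFs, hsV, hr⟩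
    by_cases hsx : s = x
    · subst hsx
      rcases hr.cases_head with rfl | ⟨q, ⟨hqn, hFq, hqV⟩, hr'⟩
      · exact Or.inl rfl
      · rcases pvReach_erase hV' hr' with h1 | ⟨n, hn, hFn, hnV', h1⟩ | rfl
        · exact Or.inr ⟨q, (hmemN q).2 (Or.inl ⟨hqn, by simp [hFq]⟩), hFq,
            hout q hqV (pvNbrs_ne hqn), h1⟩
        · exact Or.inr ⟨n, (hmemN n).2 (Or.inl ⟨hn, by simp [hFn]⟩), hFn, hnV', h1⟩
        · exact Or.inl rfl
    · have hsrest : s ∈ rest := by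
        rcases List.mem_cons.1 hs with h | h
        · exact absurd h hsx
        · exact h
      rcases pvReach_erase hV' hr with h1 | ⟨n, hn, hFn, hnV', h1⟩ | rfl
      · exact Or.inr ⟨s, (hmemN s).2 (Or.inr hsrest), hFs, hout s hsV hsx, h1⟩
      · exact Or.inr ⟨n, (hmemN n).2 (Or.inl ⟨hn, by simp [hFn]⟩), hFn, hnV', h1⟩
      · exact Or.inl rfl
  · rintro (hpx | ⟨s, hsN, hFs, hsV', hr⟩)
    · subst hpx
      exact ⟨p, by simp, hF, hxV, .refl⟩
    · have hsV : s ∉ V := fun hh => hsV' ((hV' s).2 (Or.inl hh))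
      have hrV : pvReach grid V s p := pvReach_mono hVsub hr
      rcases (hmemN s).1 hsN with ⟨hnb, _⟩ | hrest
      · exact ⟨x, (by simp), hF, hxV, Relation.ReflTransGen.head ⟨hnb, hFs, hsV⟩ hrV⟩
      · exact ⟨s, List.mem_cons_of_mem _ hrest, hFs, hsV, hrV⟩

-- Popping a visited or non-forest cell.
lemma pvRch_cons_skip {grid : List (List String)} {V : List (Int × Int)} {x : Int × Int}
    (h : ¬(x ∉ V ∧ pvCell grid x = some "forest")) (rest : List (Int × Int)) (p : Int × Int) :
    pvRch grid V (x :: rest) p ↔ pvRch grid V rest p := by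
  constructor
  · rintro ⟨s, hs, hFs, hsV, hr⟩
    rcases List.mem_cons.1 hs with rfl | hmem
    · exact absurd ⟨hsV, hFs⟩ h
    · exact ⟨s, hmem, hFs, hsV, hr⟩
  · rintro ⟨s, hs, hFs, hsV, hr⟩
    exact ⟨s, List.mem_cons_of_mem _ hs, hFs, hsV, hr⟩

-- Characterisation of A's DFS loop.
lemma pvDfsLoop_spec (grid : List (List String)) :
    ∀ (stack : List (Int × Int)) (V : PySem.Set (Int × Int)) (cl : List (Int × Int)),
    cl.Nodup → (∀ q ∈ cl, q ∈ V) →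
    (∀ q, q ∈ (pvDfsLoop grid stack V cl).1 ↔ q ∈ V ∨ pvRch grid V stack q) ∧
    (∀ q, q ∈ (pvDfsLoop grid stack V cl).2 ↔ q ∈ cl ∨ pvRch grid V stack q) ∧
    (pvDfsLoop grid stack V cl).2.Nodup ∧
    (∀ q ∈ (pvDfsLoop grid stack V cl).2, q ∈ (pvDfsLoop grid stack V cl).1) := by
  intro stack V cl
  induction stack, V, cl using pvDfsLoop.induct grid with
  | case1 visited cluster =>
    intro h1 h2
    rw [pvDfsLoop]
    refine ⟨?_, ?_, h1, h2⟩ <;> intro q <;> simp [pvRch]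
  | case2 p rest visited cluster h ih =>
    intro h1 h2
    rw [pvDfsLoop, dif_pos h]
    have hV' : ∀ q : Int × Int, q ∈ PySem.Set.add visited p ↔ q ∈ visited ∨ q = p :=
      fun q => PySem.Set.mem_add visited p q
    have hcl' : (cluster ++ [p]).Nodup := by
      have hpcl : p ∉ cluster := fun hc => h.1 (h2 p hc)
      exact h1.append (by simp) (fun q hq hq' => hpcl ((by simpa using hq' : q = p) ▸ hq))
    have hclV' : ∀ q ∈ cluster ++ [p], q ∈ PySem.Set.add visited p := by
      intro q hq
      rcases List.mem_append.1 hq with hq | hq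
      · exact (hV' q).2 (Or.inl (h2 q hq))
      · exact (hV' q).2 (Or.inr (by simpa using hq))
    obtain ⟨i1, i2, i3, i4⟩ := ih hcl' hclV'
    have hrw := pvRch_cons_forest hV' h.2 h.1 rest
    refine ⟨?_, ?_, i3, i4⟩
    · intro q
      rw [i1 q, hrw q, hV' q]
      tauto
    · intro q
      rw [i2 q, hrw q]
      simp [List.mem_append]
      tauto
  | case3 p rest visited cluster h ih =>
    intro h1 h2
    rw [pvDfsLoop, dif_neg h]
    obtain ⟨i1, i2, i3, i4⟩ := ih h1 h2
    have hrw := pvRch_cons_skip h rest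
    exact ⟨fun q => by rw [i1 q, hrw q], fun q => by rw [i2 q, hrw q], i3, i4⟩

lemma pvClosed_dfs {grid : List (List String)} {V : PySem.Set (Int × Int)}
    (hV : pvClosed grid V) (stack : List (Int × Int)) (cl : List (Int × Int))
    (hcl : cl.Nodup) (hclV : ∀ q ∈ cl, q ∈ V) :
    pvClosed grid (pvDfsLoop grid stack V cl).1 := by
  obtain ⟨i1, -, -, -⟩ := pvDfsLoop_spec grid stack V cl hcl hclV
  intro v hv n hn hFn
  rcases (i1 v).1 hv with hvV | ⟨s, hs, hFs, hsV, hr⟩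
  · exact (i1 n).2 (Or.inl (hV v hvV n hn hFn))
  · by_cases hnV : n ∈ V
    · exact (i1 n).2 (Or.inl hnV)
    · exact (i1 n).2 (Or.inr ⟨s, hs, hFs, hsV, hr.tail ⟨hn, hFn, hnV⟩⟩)

-- On a closed blocked set, blocked reachability from a fresh start is plain reachability.
lemma pvReach_of_closed {grid : List (List String)} {V : List (Int × Int)}
    (hV : pvClosed grid V) {x : Int × Int}
    (hF : pvCell grid x = some "forest") (hxV : x ∉ V) {p : Int × Int}
    (h : pvReach grid [] x p) : pvReach grid V x p ∧ p ∉ V ∧ pvCell grid p = some "forest" := by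
  induction h with
  | refl => exact ⟨.refl, hxV, hF⟩
  | @tail b q hsb hstep ih =>
    obtain ⟨ihr, ihV, ihF⟩ := ih
    obtain ⟨hn, hFq, -⟩ := hstep
    have hqV : q ∉ V := fun hqV => ihV (hV q hqV b (pvNbrs_symm hn) ihF)
    exact ⟨ihr.tail ⟨hn, hFq, hqV⟩, hqV, hFq⟩

lemma pvRch_singleton {grid : List (List String)} {V : List (Int × Int)}
    (hV : pvClosed grid V) {x : Int × Int}
    (hF : pvCell grid x = some "forest") (hxV : x ∉ V) (p : Int × Int) :
    pvRch grid V [x] p ↔ pvReach grid [] x p := by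
  constructor
  · rintro ⟨s, hs, -, -, hr⟩
    have hsx : s = x := by simpa using hs
    subst hsx
    exact pvReach_mono (fun q hq => by simp at hq) hr
  · intro h
    exact ⟨x, by simp, hF, hxV, (pvReach_of_closed hV hF hxV h).1⟩

-- Neighbour-collection set: membership and nodup.
lemma pvFNbrs_mem (grid : List (List String)) (cells : List (Int × Int)) (t : String)
    (q : Int × Int) :
    q ∈ pvFNbrs grid cells t ↔ ∃ p ∈ cells, q ∈ pvNbrs p ∧ pvCell grid q = some t := by
  have aux : ∀ (l : List (Int × Int)) (s0 : PySem.Set (Int × Int)),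
      q ∈ l.foldl
        (fun s q' => PySem.Set.update s ((pvNbrs q').filter (fun n => pvCell grid n = some t))) s0 ↔
        q ∈ s0 ∨ ∃ p ∈ l, q ∈ pvNbrs p ∧ pvCell grid q = some t := by
    intro l
    induction l with
    | nil => intro s0; simp
    | cons a l ihl =>
      intro s0
      rw [List.foldl_cons, ihl]
      rw [PySem.Set.mem_update]
      simp [List.mem_filter]
      tauto
  rw [pvFNbrs, aux]
  simp

lemma pvFNbrs_nodup (grid : List (List String)) (cells : List (Int × Int)) (t : String) :
    (pvFNbrs grid cells t).Nodup := by
  have aux : ∀ (l : List (Int × Int)) (s0 : PySem.Set (Int × Int)), s0.Nodup →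
      (l.foldl
        (fun s q' => PySem.Set.update s ((pvNbrs q').filter (fun n => pvCell grid n = some t))) s0).Nodup := by
    intro l
    induction l with
    | nil => intro s0 h; exact h
    | cons a l ihl => intro s0 h; exact ihl _ (PySem.Set.nodup_update _ _ h)
  exact aux cells PySem.Set.empty List.nodup_nil

lemma pvMountainsA_eq_pvFNbrs (grid : List (List String)) (cl : List (Int × Int)) :
    pvMountainsA grid cl = pvFNbrs grid cl "mountain" := rfl

-- Growth loop: invariants and fixpoint-or-length disjunction.
lemma pvGrow_spec (grid : List (List String)) :
    ∀ (fuel : Nat) (comp : PySem.Set (Int × Int)), comp.Nodup →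
    (pvGrow grid fuel comp).Nodup ∧
    (∀ q ∈ comp, q ∈ pvGrow grid fuel comp) ∧
    ((∀ q, q ∈ pvExpand grid (pvGrow grid fuel comp) ↔ q ∈ pvGrow grid fuel comp) ∨
      fuel + comp.length ≤ (pvGrow grid fuel comp).length) := by
  intro fuel
  induction fuel with
  | zero =>
    intro comp hnd
    rw [pvGrow]
    exact ⟨hnd, fun q hq => hq, Or.inr (by omega)⟩
  | succ fuel ihf =>
    intro comp hnd
    rw [pvGrow]
    by_cases heq : PySem.Set.equal (pvExpand grid comp) comp = true
    · rw [if_pos heq]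
      exact ⟨hnd, fun q hq => hq, Or.inl ((PySem.Set.equal_iff _ _).1 heq)⟩
    · rw [if_neg heq]
      have hnxt : (pvExpand grid comp).Nodup := by rw [pvExpand]; exact PySem.Set.nodup_union _ _ hnd
      have hsub : ∀ q ∈ comp, q ∈ pvExpand grid comp := by
        intro q hq
        rw [pvExpand, PySem.Set.mem_union]
        exact Or.inl hq
      obtain ⟨j1, j2, j3⟩ := ihf (pvExpand grid comp) hnxt
      refine ⟨j1, fun q hq => j2 q (hsub q hq), ?_⟩
      rcases j3 with j3 | j3
      · exact Or.inl j3
      · refine Or.inr ?_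
        have hx : ∃ y, y ∈ pvExpand grid comp ∧ y ∉ comp := by
          by_contra hno
          refine heq ((PySem.Set.equal_iff _ _).2 (fun y => ⟨fun hy => ?_, fun hy => hsub y hy⟩))
          by_contra hyc
          exact hno ⟨y, hy, hyc⟩
        obtain ⟨y, hy1, hy2⟩ := hx
        have hlen : comp.length + 1 ≤ (pvExpand grid comp).length := by
          have hcns : (y :: comp).Nodup := List.nodup_cons.2 ⟨hy2, hnd⟩
          have hcsub : (y :: comp).toFinset ⊆ (pvExpand grid comp).toFinset := by
            intro z hz
            simp only [List.mem_toFinset] at hz ⊢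
            rcases List.mem_cons.1 hz with rfl | hz
            · exact hy1
            · exact hsub z hz
          have := Finset.card_le_card hcsub
          rwa [List.toFinset_card_of_nodup hcns, List.toFinset_card_of_nodup hnxt,
            List.length_cons] at this
        omega

lemma pvGrow_reach (grid : List (List String)) (x : Int × Int) :
    ∀ (fuel : Nat) (comp : PySem.Set (Int × Int)),
    (∀ q ∈ comp, pvReach grid [] x q) →
    ∀ q ∈ pvGrow grid fuel comp, pvReach grid [] x q := by
  intro fuel
  induction fuel with
  | zero => intro comp h; rw [pvGrow]; exact h
  | succ fuel ihf =>
    intro comp h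
    rw [pvGrow]
    by_cases heq : PySem.Set.equal (pvExpand grid comp) comp = true
    · rw [if_pos heq]; exact h
    · rw [if_neg heq]
      refine ihf _ ?_
      intro q hq
      rw [pvExpand, PySem.Set.mem_union] at hq
      rcases hq with hq | hq
      · exact h q hq
      · obtain ⟨p, hp, hnb, hFq⟩ := (pvFNbrs_mem grid comp "forest" q).1 hq
        exact (h p hp).tail ⟨hnb, hFq, by simp⟩

lemma pvGrow_inb (grid : List (List String)) :
    ∀ (fuel : Nat) (comp : PySem.Set (Int × Int)),
    (∀ q ∈ comp, (pvCell grid q).isSome) →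
    ∀ q ∈ pvGrow grid fuel comp, (pvCell grid q).isSome := by
  intro fuel
  induction fuel with
  | zero => intro comp h; rw [pvGrow]; exact h
  | succ fuel ihf =>
    intro comp h
    rw [pvGrow]
    by_cases heq : PySem.Set.equal (pvExpand grid comp) comp = true
    · rw [if_pos heq]; exact h
    · rw [if_neg heq]
      refine ihf _ ?_
      intro q hq
      rw [pvExpand, PySem.Set.mem_union] at hq
      rcases hq with hq | hq
      · exact h q hq
      · obtain ⟨p, hp, hnb, hFq⟩ := (pvFNbrs_mem grid comp "forest" q).1 hq
        simp [hFq]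

lemma pvInb_length_le (grid : List (List String)) (l : List (Int × Int))
    (hn : l.Nodup) (hb : ∀ q ∈ l, (pvCell grid q).isSome) :
    l.length ≤ grid.length * (grid.headD []).length := by
  have hsub : l.toFinset ⊆ pvAllCells grid := by
    intro q hq
    simp only [List.mem_toFinset] at hq
    have := hb q hq
    rw [mem_pvAllCells]
    unfold pvCell at this
    split at this
    · rename_i hbnd; omega
    · simp at this
  have hinj : Function.Injective (fun rc : Nat × Nat => ((rc.1 : Int), (rc.2 : Int))) := by
    intro a b hab
    simp only [Prod.mk.injEq, Nat.cast_inj] at hab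
    exact Prod.ext hab.1 hab.2
  have hcard : (pvAllCells grid).card = grid.length * (grid.headD []).length := by
    rw [pvAllCells, Finset.card_image_of_injective _ hinj, Finset.card_product,
      Finset.card_range, Finset.card_range]
  calc l.length = l.toFinset.card := (List.toFinset_card_of_nodup hn).symm
    _ ≤ (pvAllCells grid).card := Finset.card_le_card hsub
    _ = _ := hcard

-- The component computed by B's fixpoint loop is exactly plain reachability from x.
lemma pvComp_spec (grid : List (List String)) (x : Int × Int)
    (hF : pvCell grid x = some "forest") :
    (∀ q, q ∈ pvGrow grid (grid.length * (grid.headD []).length)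
        (PySem.Set.add PySem.Set.empty x) ↔ pvReach grid [] x q) ∧
    (pvGrow grid (grid.length * (grid.headD []).length)
        (PySem.Set.add PySem.Set.empty x)).Nodup := by
  have hcomp0 : PySem.Set.add PySem.Set.empty x = [x] := rfl
  rw [hcomp0]
  have hnd : ([x] : List (Int × Int)).Nodup := by simp
  obtain ⟨g1, g2, g3⟩ := pvGrow_spec grid (grid.length * (grid.headD []).length) [x] hnd
  refine ⟨?_, g1⟩
  rcases g3 with hfix | hlen
  · intro q
    constructor
    · intro hq
      exact pvGrow_reach grid x _ [x] (by rintro q' hq'; rcases (by simpa using hq' : q' = x) with rfl; exact .refl) q hq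
    · intro hq
      induction hq with
      | refl => exact g2 x (by simp)
      | @tail b q' hsb hstep ihq =>
        obtain ⟨hnb, hFq, -⟩ := hstep
        refine (hfix q').1 ?_
        rw [pvExpand, PySem.Set.mem_union]
        exact Or.inr ((pvFNbrs_mem grid _ "forest" q').2 ⟨b, ihq, hnb, hFq⟩)
  · exfalso
    have hbnd : ∀ q ∈ pvGrow grid (grid.length * (grid.headD []).length) [x], (pvCell grid q).isSome := by
      refine pvGrow_inb grid _ [x] ?_
      rintro q hq
      rcases (by simpa using hq : q = x) with rfl
      simp [hF]
    have := pvInb_length_le grid _ g1 hbnd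
    simp only [List.length_cons, List.length_nil] at hlen
    omega

-- Lockstep invariant between A's scan state and B's scan state.
def pvInv (grid : List (List String)) (sA : PySem.Set (Int × Int) × List (List (Int × Int)))
    (sB : PySem.Set (Int × Int) × Int) : Prop :=
  (∀ q, q ∈ sA.1 ↔ q ∈ sB.1) ∧ pvClosed grid sA.1 ∧
    sA.2.foldl (pvScoreStep grid) 0 = sB.2

lemma pvInnerAB (grid : List (List String)) (r c : Int)
    (sA : PySem.Set (Int × Int) × List (List (Int × Int))) (sB : PySem.Set (Int × Int) × Int)
    (h : pvInv grid sA sB) :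
    pvInv grid (pvInnerA grid r sA c) (pvInnerB grid r sB c) := by
  obtain ⟨hmem, hclosed, hscore⟩ := h
  rw [pvInnerA, pvInnerB]
  by_cases hg : (r, c) ∉ sA.1 ∧ pvCell grid (r, c) = some "forest"
  · rw [if_pos hg, if_neg (by
      rintro (hm | hnf)
      · exact hg.1 ((hmem (r, c)).2 hm)
      · exact hnf hg.2)]
    obtain ⟨d1, d2, d3, -⟩ :=
      pvDfsLoop_spec grid [(r, c)] sA.1 [] List.nodup_nil (by simp)
    have hsing := pvRch_singleton hclosed hg.2 hg.1
    obtain ⟨c1, c2⟩ := pvComp_spec grid (r, c) hg.2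
    have hcluster : ∀ q, q ∈ (pvDfsLoop grid [(r, c)] sA.1 []).2 ↔
        q ∈ pvGrow grid (grid.length * (grid.headD []).length)
          (PySem.Set.add PySem.Set.empty (r, c)) := by
      intro q
      rw [d2 q, c1 q]
      simp [hsing q]
    refine ⟨?_, ?_, ?_⟩
    · intro q
      rw [d1 q, PySem.Set.mem_union, hsing q, ← c1 q, hmem q]
    · exact pvClosed_dfs hclosed [(r, c)] [] List.nodup_nil (by simp)
    · have hmlen : PySem.Set.len (pvMountainsA grid (pvDfsLoop grid [(r, c)] sA.1 []).2) =
          PySem.Set.len (pvFNbrs grid (pvGrow grid (grid.length * (grid.headD []).length)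
            (PySem.Set.add PySem.Set.empty (r, c))) "mountain") := by
        rw [pvMountainsA_eq_pvFNbrs]
        have hperm : (pvFNbrs grid (pvDfsLoop grid [(r, c)] sA.1 []).2 "mountain").Perm
            (pvFNbrs grid (pvGrow grid (grid.length * (grid.headD []).length)
              (PySem.Set.add PySem.Set.empty (r, c))) "mountain") := by
          rw [List.perm_ext_iff_of_nodup (pvFNbrs_nodup _ _ _) (pvFNbrs_nodup _ _ _)]
          intro q
          rw [pvFNbrs_mem, pvFNbrs_mem]
          constructor
          · rintro ⟨p, hp, hh⟩; exact ⟨p, (hcluster p).1 hp, hh⟩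
          · rintro ⟨p, hp, hh⟩; exact ⟨p, (hcluster p).2 hp, hh⟩
        simp [PySem.Set.len, hperm.length_eq]
      simp only [List.foldl_append, List.foldl_cons, List.foldl_nil]
      rw [hscore]
      rw [pvScoreStep]
      simp only [hmlen]
    -- end then-branch
  · rw [if_neg hg, if_pos (by
      by_cases hc : (r, c) ∈ sA.1
      · exact Or.inl ((hmem (r, c)).1 hc)
      · exact Or.inr (fun hF => hg ⟨hc, hF⟩))]
    exact ⟨hmem, hclosed, hscore⟩

lemma pvFoldAB (grid : List (List String)) :
    ∀ (rs : List Int) (sA : PySem.Set (Int × Int) × List (List (Int × Int)))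
      (sB : PySem.Set (Int × Int) × Int), pvInv grid sA sB →
    pvInv grid
      (rs.foldl (fun s r => (PySem.List.pyRange 0 ((grid.headD []).length : Int) 1).foldl (pvInnerA grid r) s) sA)
      (rs.foldl (fun s r => (PySem.List.pyRange 0 ((grid.headD []).length : Int) 1).foldl (pvInnerB grid r) s) sB) := by
  have inner : ∀ (r : Int) (cs : List Int) (sA' : PySem.Set (Int × Int) × List (List (Int × Int)))
      (sB' : PySem.Set (Int × Int) × Int), pvInv grid sA' sB' →
      pvInv grid (cs.foldl (pvInnerA grid r) sA') (cs.foldl (pvInnerB grid r) sB') := by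
    intro r cs
    induction cs with
    | nil => intro sA' sB' h; exact h
    | cons c cs ihc =>
      intro sA' sB' h
      exact ihc _ _ (pvInnerAB grid r c sA' sB' h)
  intro rs
  induction rs with
  | nil => intro sA sB h; exact h
  | cons r rs ihr =>
    intro sA sB h
    exact ihr _ _ (inner r _ sA sB h)

-- ===== VERDICT (by name: the statement is the Claim_ definition above) =====
theorem stonesideForest_spec : Claim_equal_stonesideForest := by
  intro grid _ _
  show stonesideForest grid = stonesideForest_alt grid
  by_cases hg : grid = []
  · subst hg; decide
  · rw [stonesideForest, stonesideForest_alt, if_neg hg]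
    have hinit : pvInv grid (PySem.Set.empty, ([] : List (List (Int × Int))))
        (PySem.Set.empty, (0 : Int)) := by
      refine ⟨fun q => Iff.rfl, ?_, rfl⟩
      intro v hv
      simp at hv
    have h := pvFoldAB grid (PySem.List.pyRange 0 (grid.length : Int) 1) _ _ hinit
    rw [h.2.2]
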